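-- pv_equiv track=rewrite | github.com/HeadHunter483/msu-ling | Syntax/Codes/python/morph.py | spro_morph
-- ===== SOURCE A (Python) =====
-- def spro_morph(string):
--     str5=""
--     word = string.split()
--     mas=[]
--     mas2=[]
--
--     for current_word in word:
--         mas.append(current_word.lower())
--
--     while(len(mas2)!=4):
--         mas2.append("-")
--
--     for s in mas:
--         if (s=='sg' or s=='pl'):
--             mas2[0]=s
--         if (s=='1p' or s=='2p' or s=='3p'):
--             mas2[1]=s
--         if (s=='f' or s=='m' or s=='n'):
--             mas2[2]=s
--         if (s=='nom' or s=='gen' or s=='dat' or s=='acc' or s=='ins' or s=='loc'):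
--             mas2[3]=s
--
--     i=0
--     for i in range(len(mas2)):
--         str5=str5+' '+mas2[i]
--
--
--     return str5
--
-- i=0
-- ===== SOURCE B (Python) =====
-- def spro_morph(string):
--     words = [w.lower() for w in string.split()]
--     cats = [("sg", "pl"),
--             ("1p", "2p", "3p"),
--             ("f", "m", "n"),
--             ("nom", "gen", "dat", "acc", "ins", "loc")]
--     slots = [next((w for w in reversed(words) if w in cat), "-") for cat in cats]
--     return "".join(" " + s for s in slots)
-- ===== Notes on version B (the rewrite author's own statement) =====
-- stated objective: alternative
-- what changed: Instead of one word-loop that mutates a 4-slot array with four or-chained membership tests per word, B iterates per category: for each of the four category tuples it scans the reversed lowercased word list for the first member (last-occurrence-wins) and joins the four slots with a leading space.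
import Mathlib
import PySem

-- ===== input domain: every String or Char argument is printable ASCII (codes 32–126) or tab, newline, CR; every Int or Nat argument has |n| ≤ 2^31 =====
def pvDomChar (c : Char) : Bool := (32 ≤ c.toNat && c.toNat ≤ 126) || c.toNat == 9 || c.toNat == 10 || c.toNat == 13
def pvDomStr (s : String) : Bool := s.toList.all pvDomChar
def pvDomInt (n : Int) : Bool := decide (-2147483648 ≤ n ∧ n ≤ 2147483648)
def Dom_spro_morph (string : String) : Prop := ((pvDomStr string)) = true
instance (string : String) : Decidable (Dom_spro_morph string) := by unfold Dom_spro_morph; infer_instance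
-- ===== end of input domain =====

-- B replaces A's single word-loop mutating a 4-slot array by a per-category scan of the
-- reversed word list (alternative decomposition, same cost).

-- ===== PORT A =====
-- while(len(mas2)!=4): mas2.append("-")   — fuel-bounded transliteration of the while loop
def sproFill : Nat → List (List Char) → List (List Char)
  | 0, m => m
  | n + 1, m => if m.length ≠ 4 then sproFill n (m ++ [['-']]) else m

def spro_morph (string : String) : String :=
  let str5 : List Char := []
  let word : List String := PySem.Str.split₀ string
  let mas : List (List Char) :=
    word.foldl (fun mas cw => mas ++ [PySem.Chars.lower cw.toList]) []
  let mas2 : List (List Char) := sproFill 5 []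
  let mas2 : List (List Char) :=
    mas.foldl (fun mas2 s =>
      let mas2 := if s == "sg".toList || s == "pl".toList then PySem.List.pySetD mas2 0 s else mas2
      let mas2 := if s == "1p".toList || s == "2p".toList || s == "3p".toList then PySem.List.pySetD mas2 1 s else mas2
      let mas2 := if s == "f".toList || s == "m".toList || s == "n".toList then PySem.List.pySetD mas2 2 s else mas2
      let mas2 := if s == "nom".toList || s == "gen".toList || s == "dat".toList || s == "acc".toList || s == "ins".toList || s == "loc".toList then PySem.List.pySetD mas2 3 s else mas2
      mas2) mas2
  let str5 : List Char :=
    (PySem.List.pyRange 0 (PySem.List.len mas2) 1).foldl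
      (fun str5 i => str5 ++ [' '] ++ PySem.List.pyGetD mas2 i []) str5
  String.ofList str5

-- ===== PORT B =====
def sproCats : List (List (List Char)) :=
  [["sg".toList, "pl".toList],
   ["1p".toList, "2p".toList, "3p".toList],
   ["f".toList, "m".toList, "n".toList],
   ["nom".toList, "gen".toList, "dat".toList, "acc".toList, "ins".toList, "loc".toList]]

-- last word of ws that belongs to cat: first hit in the reversed list, default "-"
def sproLastHit (ws : List (List Char)) (cat : List (List Char)) : List Char :=
  (ws.reverse.find? (fun w => cat.contains w)).getD ['-']

def spro_morph_alt (string : String) : String :=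
  let words : List (List Char) :=
    (PySem.Str.split₀ string).map (fun w => PySem.Chars.lower w.toList)
  String.ofList ((sproCats.map (sproLastHit words)).flatMap (fun s => ' ' :: s))

-- ===== PRECONDITION & SPEC =====
def Spec_spro_morph (string : String) (out : String) : Prop := out = spro_morph_alt string
instance (string : String) (out : String) : Decidable (Spec_spro_morph string out) := by unfold Spec_spro_morph; infer_instance

-- ===== CLAIM (what is proved, stated in full; the proofs are below) =====
def Claim_equal_spro_morph : Prop := ∀ (string : String), Dom_spro_morph string → Spec_spro_morph string (spro_morph string)

-- ===== LEMMAS AND PROOFS =====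

-- last-match-wins fold = first hit in the reversed list
theorem foldl_lastmatch {α : Type} (q : α → Bool) (ws : List α) (a : α) :
    ws.foldl (fun acc w => if q w then w else acc) a = (ws.reverse.find? q).getD a := by
  induction ws generalizing a with
  | nil => rfl
  | cons w ws ih =>
    simp only [List.foldl_cons, List.reverse_cons, List.find?_append]
    rw [ih]
    cases ws.reverse.find? q with
    | some x => rfl
    | none =>
      simp only [Option.none_or, Option.getD]
      cases h : q w <;> simp [List.find?, h]

-- A's word-loop over a 4-element state splits into four independent last-match folds
theorem sproLoop_split (ws : List (List Char)) (a b c d : List Char) :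
    ws.foldl (fun mas2 s =>
      let mas2 := if s == "sg".toList || s == "pl".toList then PySem.List.pySetD mas2 0 s else mas2
      let mas2 := if s == "1p".toList || s == "2p".toList || s == "3p".toList then PySem.List.pySetD mas2 1 s else mas2
      let mas2 := if s == "f".toList || s == "m".toList || s == "n".toList then PySem.List.pySetD mas2 2 s else mas2
      let mas2 := if s == "nom".toList || s == "gen".toList || s == "dat".toList || s == "acc".toList || s == "ins".toList || s == "loc".toList then PySem.List.pySetD mas2 3 s else mas2
      mas2) [a, b, c, d]
    = [ws.foldl (fun acc w => if w == "sg".toList || w == "pl".toList then w else acc) a,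
       ws.foldl (fun acc w => if w == "1p".toList || w == "2p".toList || w == "3p".toList then w else acc) b,
       ws.foldl (fun acc w => if w == "f".toList || w == "m".toList || w == "n".toList then w else acc) c,
       ws.foldl (fun acc w => if w == "nom".toList || w == "gen".toList || w == "dat".toList || w == "acc".toList || w == "ins".toList || w == "loc".toList then w else acc) d] := by
  induction ws generalizing a b c d with
  | nil => rfl
  | cons w ws ih =>
    simp only [List.foldl_cons]
    rw [← ih]
    congr 1
    simp only [PySem.List.pySetD, PySem.List.pySet?]
    split_ifs <;> rfl

theorem sproLastHit_eq (ws : List (List Char)) (q : List Char → Bool)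
    (cat : List (List Char)) (hq : ∀ w, (cat.contains w) = q w) :
    sproLastHit ws cat = (ws.reverse.find? q).getD ['-'] := by
  unfold sproLastHit
  have h : (fun w => cat.contains w) = q := funext hq
  rw [h]

-- ===== VERDICT (by name: the statement is the Claim_ definition above) =====
theorem spro_morph_spec : Claim_equal_spro_morph := by
  intro string _
  unfold Spec_spro_morph spro_morph spro_morph_alt
  simp only []
  rw [PySem.List.foldl_append_singleton_eq_map]
  set ws : List (List Char) := (PySem.Str.split₀ string).map (fun w => PySem.Chars.lower w.toList) with hws
  have hfill : sproFill 5 [] = [['-'], ['-'], ['-'], ['-']] := by rfl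
  rw [hfill, sproLoop_split]
  have h1 : sproLastHit ws ["sg".toList, "pl".toList]
      = (ws.reverse.find? (fun w => w == "sg".toList || w == "pl".toList)).getD ['-'] := by
    apply sproLastHit_eq; intro w; rw [Bool.eq_iff_iff]; simp
  have h2 : sproLastHit ws ["1p".toList, "2p".toList, "3p".toList]
      = (ws.reverse.find? (fun w => w == "1p".toList || w == "2p".toList || w == "3p".toList)).getD ['-'] := by
    apply sproLastHit_eq; intro w; rw [Bool.eq_iff_iff]; simp [or_assoc]
  have h3 : sproLastHit ws ["f".toList, "m".toList, "n".toList]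
      = (ws.reverse.find? (fun w => w == "f".toList || w == "m".toList || w == "n".toList)).getD ['-'] := by
    apply sproLastHit_eq; intro w; rw [Bool.eq_iff_iff]; simp [or_assoc]
  have h4 : sproLastHit ws ["nom".toList, "gen".toList, "dat".toList, "acc".toList, "ins".toList, "loc".toList]
      = (ws.reverse.find? (fun w => w == "nom".toList || w == "gen".toList || w == "dat".toList || w == "acc".toList || w == "ins".toList || w == "loc".toList)).getD ['-'] := by
    apply sproLastHit_eq; intro w; rw [Bool.eq_iff_iff]; simp [or_assoc]
  simp only [sproCats, List.map_cons, List.map_nil, h1, h2, h3, h4,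
    foldl_lastmatch, List.flatMap_cons, List.flatMap_nil, List.nil_append]
  have hlen : ∀ (a b c d : List Char), PySem.List.len [a, b, c, d] = 4 := by
    intro a b c d; simp [PySem.List.len_eq]
  rw [hlen]
  have hrange : PySem.List.pyRange 0 4 1 = [0, 1, 2, 3] := by decide
  rw [hrange]
  simp [PySem.List.pyGetD, PySem.List.pyGet?, PySem.List.pyIdx?]
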